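-- pv_equiv track=rewrite | github.com/kodakar/AtCorder_ToGreen | toGreen/9-N進数.py | judge_eight
-- ===== SOURCE A (Python) =====
-- def judge_eight(n):
--     s = ""
--     while n > 0:
--         s = str(n % 8) + s
--         n //= 8
--
--     if '7' in s:
--         return True
--     else:
--         return False
-- ===== SOURCE B (Python) =====
-- def judge_eight(n):
--     while n > 0:
--         if n % 8 == 7:
--             return True
--         n //= 8
--     return False
-- ===== Notes on version B (the rewrite author's own statement) =====
-- stated objective: simpler
-- what changed: B tests each base-8 digit as it is produced and short-circuits on the first 7, instead of building the whole base-8 string and then scanning it for '7'.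
import Mathlib
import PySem

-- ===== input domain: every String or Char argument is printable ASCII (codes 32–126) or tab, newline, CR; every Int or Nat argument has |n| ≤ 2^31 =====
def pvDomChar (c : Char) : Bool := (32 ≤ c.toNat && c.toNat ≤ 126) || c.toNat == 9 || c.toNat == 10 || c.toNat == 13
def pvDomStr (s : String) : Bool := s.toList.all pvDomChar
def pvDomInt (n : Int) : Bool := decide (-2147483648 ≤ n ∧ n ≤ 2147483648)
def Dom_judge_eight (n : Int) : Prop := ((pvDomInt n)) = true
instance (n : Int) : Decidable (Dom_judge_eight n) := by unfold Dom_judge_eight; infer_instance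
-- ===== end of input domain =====

-- B checks each base-8 digit as it is produced and short-circuits on the first 7,
-- instead of building the whole base-8 string and then scanning it for '7' (simpler).

-- ===== PORT A =====
-- the 'while n > 0' loop of A, carrying the accumulated string s
def judgeEightLoopA (n : Int) (s : String) : String :=
  if h : n > 0 then
    judgeEightLoopA (PySem.Int.floordiv n 8) (PySem.Int.toStr (PySem.Int.mod n 8) ++ s)
  else s
termination_by n.toNat
decreasing_by
  have hf : PySem.Int.floordiv n 8 = n / 8 := by
    simp [PySem.Int.floordiv, Int.fdiv_eq_ediv]
  rw [hf]; omega

def judge_eight (n : Int) : Bool :=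
  let s := judgeEightLoopA n ""
  if PySem.Str.isIn "7" s then true else false

-- ===== PORT B =====
def judge_eight_alt (n : Int) : Bool :=
  if h : n > 0 then
    if PySem.Int.mod n 8 = 7 then true
    else judge_eight_alt (PySem.Int.floordiv n 8)
  else false
termination_by n.toNat
decreasing_by
  have hf : PySem.Int.floordiv n 8 = n / 8 := by
    simp [PySem.Int.floordiv, Int.fdiv_eq_ediv]
  rw [hf]; omega

-- ===== PRECONDITION & SPEC =====
def Spec_judge_eight (n : Int) (out : Bool) : Prop := out = judge_eight_alt n
instance (n : Int) (out : Bool) : Decidable (Spec_judge_eight n out) := by unfold Spec_judge_eight; infer_instance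

-- ===== CLAIM (what is proved, stated in full; the proofs are below) =====
def Claim_equal_judge_eight : Prop := ∀ (n : Int), Dom_judge_eight n → Spec_judge_eight n (judge_eight n)

-- ===== LEMMAS AND PROOFS =====

-- a one-character needle is a substring iff the character is a member
theorem isIn_singleton (c : Char) (l : List Char) :
    PySem.Chars.isIn [c] l = true ↔ c ∈ l := by
  rw [PySem.Chars.isIn_iff_infix]
  constructor
  · intro h; exact h.sublist.subset (by simp)
  · intro h
    obtain ⟨p, q, rfl⟩ := List.append_of_mem h
    exact ⟨p, q, by simp⟩

-- the digit string of one base-8 digit contains '7' iff the digit is 7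
theorem mem_toChars_digit (r : Int) (h0 : 0 ≤ r) (h8 : r < 8) :
    ('7' ∈ PySem.Int.toChars r) ↔ r = 7 := by
  interval_cases r <;> decide

-- '7' is in A's loop result iff B says true or '7' was already in the accumulator
theorem isIn7_judgeEightLoopA_bounded (k : Nat) :
    ∀ (n : Int), n.toNat ≤ k → ∀ (s : String),
      PySem.Chars.isIn ['7'] (judgeEightLoopA n s).toList =
        (judge_eight_alt n || PySem.Chars.isIn ['7'] s.toList) := by
  induction k with
  | zero =>
    intro n hn s
    have h : ¬ n > 0 := by omega
    rw [judgeEightLoopA, dif_neg h, judge_eight_alt, dif_neg h]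
    simp
  | succ k ih =>
    intro n hn s
    by_cases h : n > 0
    · rw [judgeEightLoopA, dif_pos h, judge_eight_alt, dif_pos h]
      have hf : PySem.Int.floordiv n 8 = n / 8 := by
        simp [PySem.Int.floordiv, Int.fdiv_eq_ediv]
      have hle : (PySem.Int.floordiv n 8).toNat ≤ k := by rw [hf]; omega
      rw [ih _ hle]
      have h0 := PySem.Int.mod_nonneg n (b := 8) (by norm_num)
      have h8 := PySem.Int.mod_lt n (b := 8) (by norm_num)
      have hdig : PySem.Chars.isIn ['7'] (PySem.Int.toStr (PySem.Int.mod n 8) ++ s).toList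
          = (decide (PySem.Int.mod n 8 = 7) || PySem.Chars.isIn ['7'] s.toList) := by
        rw [Bool.eq_iff_iff]
        simp only [Bool.or_eq_true, decide_eq_true_eq, isIn_singleton, String.toList_append,
          PySem.Int.toList_toStr, List.mem_append, mem_toChars_digit _ h0 h8]
      rw [hdig]
      by_cases h7 : PySem.Int.mod n 8 = 7 <;>
        cases judge_eight_alt (PySem.Int.floordiv n 8) <;>
          cases hs : PySem.Chars.isIn ['7'] s.toList <;> simp [h7, hs]
    · rw [judgeEightLoopA, dif_neg h, judge_eight_alt, dif_neg h]
      simp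

theorem isIn7_judgeEightLoopA (n : Int) (s : String) :
    PySem.Chars.isIn ['7'] (judgeEightLoopA n s).toList =
      (judge_eight_alt n || PySem.Chars.isIn ['7'] s.toList) :=
  isIn7_judgeEightLoopA_bounded n.toNat n (le_refl _) s

-- ===== VERDICT (by name: the statement is the Claim_ definition above) =====
theorem judge_eight_spec : Claim_equal_judge_eight := by
  intro n _
  unfold Spec_judge_eight judge_eight
  have h1 : PySem.Str.isIn "7" (judgeEightLoopA n "") = judge_eight_alt n := by
    rw [PySem.Str.isIn_eq, show ("7" : String).toList = ['7'] from rfl,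
      isIn7_judgeEightLoopA n ""]
    have he : PySem.Chars.isIn ['7'] ([] : List Char) = false := by decide
    simp [he]
  simp only [h1]
  cases judge_eight_alt n <;> simp
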